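-- pv_equiv track=rewrite | github.com/potentialgenie/ai_team_orchestrator | backend/concrete_asset_extractor_refactored.py | _ai_infer_target_audience
-- ===== SOURCE A (Python) =====
-- def _ai_infer_target_audience(workspace_goal: str) -> str:
--     """AI-driven audience inference - universal"""
--     goal_lower = workspace_goal.lower()
--
--     # Universal audience patterns
--     if any(term in goal_lower for term in ['cmo', 'cto', 'executive', 'manager']):
--         return "Decision makers and executives"
--     elif any(term in goal_lower for term in ['developer', 'engineer', 'technical']):
--         return "Technical professionals"
--     elif any(term in goal_lower for term in ['beginner', 'new', 'start']):
--         return "Beginners and newcomers"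
--     elif any(term in goal_lower for term in ['professional', 'expert', 'advanced']):
--         return "Advanced professionals"
--     else:
--         return "Target audience members"
-- ===== SOURCE B (Python) =====
-- # B: min-priority fold over a flat keyword->priority map (no branch chain, no early return).
-- _KEYWORD_PRIORITY = {
--     'cmo': 0, 'cto': 0, 'executive': 0, 'manager': 0,
--     'developer': 1, 'engineer': 1, 'technical': 1,
--     'beginner': 2, 'new': 2, 'start': 2,
--     'professional': 3, 'expert': 3, 'advanced': 3,
-- }
-- _RESULTS = [
--     "Decision makers and executives",
--     "Technical professionals",
--     "Beginners and newcomers",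
--     "Advanced professionals",
--     "Target audience members",
-- ]
--
-- def _ai_infer_target_audience(workspace_goal: str) -> str:
--     goal_lower = workspace_goal.lower()
--     best = 4
--     for kw, pri in _KEYWORD_PRIORITY.items():
--         if kw in goal_lower:
--             best = min(best, pri)
--     return _RESULTS[best]
-- ===== Notes on version B (the rewrite author's own statement) =====
-- stated objective: alternative
-- what changed: The if/elif chain of any()-scans is replaced by a single fold over a flat keyword-to-priority map that accumulates the minimum matched priority and indexes a result array, with no early return or branch chain.
import Mathlib
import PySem

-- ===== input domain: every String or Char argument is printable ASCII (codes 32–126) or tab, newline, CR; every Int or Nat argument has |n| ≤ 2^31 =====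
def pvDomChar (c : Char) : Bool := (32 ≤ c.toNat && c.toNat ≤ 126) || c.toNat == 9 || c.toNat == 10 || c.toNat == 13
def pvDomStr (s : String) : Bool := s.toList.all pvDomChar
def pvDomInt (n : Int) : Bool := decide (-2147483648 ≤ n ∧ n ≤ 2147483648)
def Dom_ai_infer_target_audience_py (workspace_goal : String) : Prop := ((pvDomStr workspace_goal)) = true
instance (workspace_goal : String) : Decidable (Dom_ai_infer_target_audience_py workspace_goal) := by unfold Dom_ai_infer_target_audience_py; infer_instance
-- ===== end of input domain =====

-- B replaces A's if/elif chain by a minimum-priority fold over a flat keyword map; return values proved equal.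

-- ===== PORT A =====
-- Port of A: literal if/elif chain over `any(term in goal_lower ...)`.
def ai_infer_target_audience_py (workspace_goal : String) : String :=
  let goal_lower := PySem.Str.lower workspace_goal
  if ["cmo", "cto", "executive", "manager"].any (fun term => PySem.Str.isIn term goal_lower) then
    "Decision makers and executives"
  else if ["developer", "engineer", "technical"].any (fun term => PySem.Str.isIn term goal_lower) then
    "Technical professionals"
  else if ["beginner", "new", "start"].any (fun term => PySem.Str.isIn term goal_lower) then
    "Beginners and newcomers"
  else if ["professional", "expert", "advanced"].any (fun term => PySem.Str.isIn term goal_lower) then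
    "Advanced professionals"
  else
    "Target audience members"

-- ===== PORT B =====
-- B: fold over the flat keyword→priority map, keeping the minimum matched priority.
def pvKeywordPriority : List (String × Nat) :=
  [("cmo", 0), ("cto", 0), ("executive", 0), ("manager", 0),
   ("developer", 1), ("engineer", 1), ("technical", 1),
   ("beginner", 2), ("new", 2), ("start", 2),
   ("professional", 3), ("expert", 3), ("advanced", 3)]

def pvResults : List String :=
  ["Decision makers and executives", "Technical professionals",
   "Beginners and newcomers", "Advanced professionals", "Target audience members"]

def ai_infer_target_audience_py_alt (workspace_goal : String) : String :=
  let goal_lower := PySem.Str.lower workspace_goal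
  let best := pvKeywordPriority.foldl
    (fun best kp => if PySem.Str.isIn kp.1 goal_lower then min best kp.2 else best) 4
  -- `_RESULTS[best]` ported as getD: best ≤ 4 always, so the default is never used (exact).
  pvResults.getD best ""

-- ===== PRECONDITION & SPEC =====
def Spec_ai_infer_target_audience_py (workspace_goal : String) (out : String) : Prop := out = ai_infer_target_audience_py_alt workspace_goal
instance (workspace_goal : String) (out : String) : Decidable (Spec_ai_infer_target_audience_py workspace_goal out) := by unfold Spec_ai_infer_target_audience_py; infer_instance

-- ===== CLAIM =====
def Claim_equal_ai_infer_target_audience_py : Prop := ∀ (workspace_goal : String), Dom_ai_infer_target_audience_py workspace_goal → Spec_ai_infer_target_audience_py workspace_goal (ai_infer_target_audience_py workspace_goal)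

-- ===== LEMMAS AND PROOFS =====

-- Folding one constant-priority group: min with p iff any keyword of the group matches.
theorem pvGroupFold (g : String) (p : Nat) (kws : List String) (b : Nat) :
    List.foldl (fun best kp => if PySem.Str.isIn kp.1 g then min best kp.2 else best) b
      (kws.map (fun k => (k, p)))
    = if kws.any (fun k => PySem.Str.isIn k g) then min b p else b := by
  induction kws generalizing b with
  | nil => simp
  | cons k rest ih =>
      by_cases h : PySem.Str.isIn k g
      · simp only [List.map_cons, List.foldl_cons, List.any_cons, h, if_true, Bool.true_or, ih]
        split_ifs <;> simp [Nat.min_assoc]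
      · simp only [List.map_cons, List.foldl_cons, List.any_cons, h, Bool.false_or, ih]
        simp

theorem ai_infer_target_audience_py_spec : Claim_equal_ai_infer_target_audience_py := by
  intro g _
  unfold Spec_ai_infer_target_audience_py ai_infer_target_audience_py ai_infer_target_audience_py_alt
  show _ = _
  rw [show pvKeywordPriority =
        ((["cmo", "cto", "executive", "manager"].map (fun k => (k, 0)))
          ++ (["developer", "engineer", "technical"].map (fun k => (k, 1)))
          ++ (["beginner", "new", "start"].map (fun k => (k, 2)))
          ++ (["professional", "expert", "advanced"].map (fun k => (k, 3)))) from rfl]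
  simp only [List.foldl_append, pvGroupFold]
  split_ifs <;> rfl
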